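-- pv_equiv track=rewrite | github.com/johnlennyt5/cs50-AI | week 0/tictactoe/tictactoe.py | checkFirstDiag
-- ===== SOURCE A (Python) =====
-- def checkFirstDiag(board,player):
--     count =0
--     for row in range(len(board)):
--         for col in range(len(board[row])):
--             if row ==col and board[row][col] == player:
--                 count += 1
--     if count == 3:
--         return True
--     else:
--         return False
-- ===== SOURCE B (Python) =====
-- def checkFirstDiag(board, player):
--     count = sum(1 for i in range(len(board))
--                 if i < len(board[i]) and board[i][i] == player)
--     return count == 3
-- ===== Notes on version B (the rewrite author's own statement) =====
-- stated objective: simpler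
-- what changed: B inspects only the diagonal cells in a single comprehension (with a length guard for jagged rows) instead of A's nested scan over every cell, then compares the count to 3.
import Mathlib
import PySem

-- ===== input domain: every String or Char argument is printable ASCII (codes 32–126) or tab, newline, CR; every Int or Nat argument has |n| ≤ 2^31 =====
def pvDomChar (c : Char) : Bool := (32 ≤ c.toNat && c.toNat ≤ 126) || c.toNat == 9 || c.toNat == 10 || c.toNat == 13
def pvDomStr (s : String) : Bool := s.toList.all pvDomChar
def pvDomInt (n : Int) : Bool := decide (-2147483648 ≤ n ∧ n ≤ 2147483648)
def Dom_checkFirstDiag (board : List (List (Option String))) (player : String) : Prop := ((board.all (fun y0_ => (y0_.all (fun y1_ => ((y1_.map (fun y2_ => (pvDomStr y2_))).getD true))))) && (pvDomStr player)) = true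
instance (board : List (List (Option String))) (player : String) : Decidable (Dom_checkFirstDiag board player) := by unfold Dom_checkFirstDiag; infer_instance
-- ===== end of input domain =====

-- ===== PORT A =====
-- A: nested loops over every cell, counting diagonal matches, then count == 3.
def checkFirstDiag (board : List (List (Option String))) (player : String) : Bool :=
  let count :=
    (List.range board.length).foldl (fun count row =>
      let rowL := board.getD row []
      (List.range rowL.length).foldl (fun count col =>
        if row = col ∧ rowL.getD col none = some player then count + 1 else count) count) 0
  if count = 3 then true else false

-- ===== PORT B =====
-- B: one pass over diagonal indices only (guard keeps jagged rows safe), then count == 3.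
def checkFirstDiag_alt (board : List (List (Option String))) (player : String) : Bool :=
  let count :=
    (List.range board.length).foldl (fun c i =>
      c + (if i < (board.getD i []).length ∧ (board.getD i []).getD i none = some player
           then 1 else 0)) 0
  count == 3

-- ===== PRECONDITION & SPEC =====
def Spec_checkFirstDiag (board : List (List (Option String))) (player : String) (out : Bool) : Prop := out = checkFirstDiag_alt board player
instance (board : List (List (Option String))) (player : String) (out : Bool) : Decidable (Spec_checkFirstDiag board player out) := by unfold Spec_checkFirstDiag; infer_instance

-- ===== CLAIM (what is proved, stated in full; the proofs are below) =====
def Claim_equal_checkFirstDiag : Prop := ∀ (board : List (List (Option String))) (player : String), Dom_checkFirstDiag board player → Spec_checkFirstDiag board player (checkFirstDiag board player)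

-- ===== LEMMAS AND PROOFS =====

-- A's inner row scan adds 1 exactly when the diagonal index is inside the row and matches.
theorem pv_inner_count (P : Nat → Prop) [DecidablePred P] (row : Nat) :
    ∀ (n c : Nat),
      (List.range n).foldl (fun count col => if row = col ∧ P col then count + 1 else count) c
        = c + (if row < n ∧ P row then 1 else 0) := by
  intro n
  induction n with
  | zero => intro c; simp
  | succ m ih =>
      intro c
      rw [List.range_succ, List.foldl_append, ih]
      simp only [List.foldl_cons, List.foldl_nil]
      by_cases hrm : row = m
      · subst hrm
        by_cases hp : P row <;> simp [hp]
      · by_cases hp : P row <;> simp [hrm, hp] <;> split_ifs <;> omega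

theorem pv_counts_eq (board : List (List (Option String))) (player : String) :
    (List.range board.length).foldl (fun count row =>
      let rowL := board.getD row []
      (List.range rowL.length).foldl (fun count col =>
        if row = col ∧ rowL.getD col none = some player then count + 1 else count) count) 0
    = (List.range board.length).foldl (fun c i =>
      c + (if i < (board.getD i []).length ∧ (board.getD i []).getD i none = some player
           then 1 else 0)) 0 := by
  have hfun : (fun (count row : Nat) =>
      let rowL := board.getD row []
      (List.range rowL.length).foldl (fun count col =>
        if row = col ∧ rowL.getD col none = some player then count + 1 else count) count)
    = (fun (c i : Nat) =>
      c + (if i < (board.getD i []).length ∧ (board.getD i []).getD i none = some player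
           then 1 else 0)) := by
    funext c i
    exact pv_inner_count (fun col => (board.getD i []).getD col none = some player) i _ c
  rw [hfun]

-- ===== VERDICT (by name: the statement is the Claim_ definition above) =====
theorem checkFirstDiag_spec : Claim_equal_checkFirstDiag := by
  intro board player _
  show checkFirstDiag board player = checkFirstDiag_alt board player
  unfold checkFirstDiag checkFirstDiag_alt
  rw [pv_counts_eq]
  exact (decide_eq_decide.mpr beq_iff_eq.symm).trans (Bool.decide_coe _)
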